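-- pv_equiv track=rewrite | github.com/ifeanyicyriacus/pythonClass | classwork/november_2024/21_nov/TigerNut/tigernut.py | ignore_index
-- ===== SOURCE A (Python) =====
-- def ignore_index(int_list : list) -> int:
--     total = 0
--     for indexA in range(len(int_list)):
--         for indexB in range(len(int_list)):
--             if indexA == indexB:
--                 continue
--             total += int_list[indexB]
--     return total
-- ===== SOURCE B (Python) =====
-- def ignore_index(int_list : list) -> int:
--     return (len(int_list) - 1) * sum(int_list)
-- ===== Notes on version B (the rewrite author's own statement) =====
-- stated objective: faster
-- what changed: Replaces the quadratic double loop (each element added n-1 times) with the closed form (n-1)*sum(list) computed in one pass.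
import Mathlib
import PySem

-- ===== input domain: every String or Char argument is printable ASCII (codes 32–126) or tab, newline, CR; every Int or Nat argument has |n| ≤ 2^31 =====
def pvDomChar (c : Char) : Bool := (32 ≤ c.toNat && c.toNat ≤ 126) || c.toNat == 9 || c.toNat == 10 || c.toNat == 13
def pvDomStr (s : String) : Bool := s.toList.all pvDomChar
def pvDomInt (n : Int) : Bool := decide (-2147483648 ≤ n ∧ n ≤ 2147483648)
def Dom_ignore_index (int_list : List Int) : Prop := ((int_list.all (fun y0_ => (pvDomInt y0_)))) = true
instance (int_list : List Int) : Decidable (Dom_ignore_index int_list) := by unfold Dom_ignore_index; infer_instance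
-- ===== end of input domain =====

-- ===== PORT A =====
-- B: closed form (n-1)*sum replacing A's quadratic double loop; return values agree on all inputs.
def ignore_index (int_list : List Int) : Int :=
  (PySem.List.pyRange 0 int_list.length 1).foldl (fun total indexA =>
    (PySem.List.pyRange 0 int_list.length 1).foldl (fun total indexB =>
      if indexA = indexB then total
      else total + PySem.List.pyGetD int_list indexB 0) total) 0

-- ===== PORT B =====
def ignore_index_alt (int_list : List Int) : Int :=
  ((int_list.length : Int) - 1) * int_list.sum

-- ===== PRECONDITION & SPEC =====
def Spec_ignore_index (int_list : List Int) (out : Int) : Prop := out = ignore_index_alt int_list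
instance (int_list : List Int) (out : Int) : Decidable (Spec_ignore_index int_list out) := by unfold Spec_ignore_index; infer_instance

-- ===== CLAIM (what is proved, stated in full; the proofs are below) =====
def Claim_equal_ignore_index : Prop := ∀ (int_list : List Int), Dom_ignore_index int_list → Spec_ignore_index int_list (ignore_index int_list)

-- ===== LEMMAS AND PROOFS =====

-- ===== VERDICT (by name: the statement is the Claim_ definition above) =====
lemma pv_sum_map_sub (xs : List Int) (f g : Int → Int) :
    (xs.map (fun x => f x - g x)).sum = (xs.map f).sum - (xs.map g).sum := by
  induction xs with
  | nil => simp
  | cons a t ih => simp [ih]; ring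

lemma sum_map_skip (l : List Int) (iA : Int) (h0 : 0 ≤ iA) (h1 : iA < (l.length : Int)) :
    (((PySem.List.pyRange 0 (l.length : Int) 1).map
      (fun j => if iA = j then 0 else PySem.List.pyGetD l j 0)).sum)
    = l.sum - PySem.List.pyGetD l iA 0 := by
  have hsplit : PySem.List.pyRange 0 (l.length : Int) 1
      = PySem.List.pyRange 0 iA 1 ++ iA :: PySem.List.pyRange (iA+1) (l.length : Int) 1 := by
    rw [PySem.List.pyRange_one_append 0 iA (l.length : Int) h0 (le_of_lt h1),
        PySem.List.pyRange_one_cons h1]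
  have hlo : (PySem.List.pyRange 0 iA 1).map
      (fun j => if iA = j then 0 else PySem.List.pyGetD l j 0)
      = (PySem.List.pyRange 0 iA 1).map (fun j => PySem.List.pyGetD l j 0) := by
    apply List.map_congr_left
    intro j hj
    have := (PySem.List.mem_pyRange_one).1 hj
    rw [if_neg (by omega)]
  have hhi : (PySem.List.pyRange (iA+1) (l.length : Int) 1).map
      (fun j => if iA = j then 0 else PySem.List.pyGetD l j 0)
      = (PySem.List.pyRange (iA+1) (l.length : Int) 1).map (fun j => PySem.List.pyGetD l j 0) := by
    apply List.map_congr_left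
    intro j hj
    have := (PySem.List.mem_pyRange_one).1 hj
    rw [if_neg (by omega)]
  have hfull : (PySem.List.pyRange 0 (l.length : Int) 1).map
      (fun j => PySem.List.pyGetD l j 0) = l :=
    PySem.List.map_pyGetD_pyRange_zero l 0
  rw [hsplit] at hfull ⊢
  simp only [List.map_append, List.map_cons, List.sum_append, List.sum_cons] at hfull ⊢
  rw [hlo, hhi, if_pos trivial]
  have hs := congrArg List.sum hfull
  simp only [List.sum_append, List.sum_cons] at hs
  omega

lemma inner_fold (l : List Int) (iA t : Int) (h0 : 0 ≤ iA) (h1 : iA < (l.length : Int)) :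
    ((PySem.List.pyRange 0 (l.length : Int) 1).foldl (fun total indexB =>
      if iA = indexB then total
      else total + PySem.List.pyGetD l indexB 0) t)
    = t + (l.sum - PySem.List.pyGetD l iA 0) := by
  have hbody : (fun (total indexB : Int) =>
      if iA = indexB then total else total + PySem.List.pyGetD l indexB 0)
      = (fun total indexB => total + (if iA = indexB then 0 else PySem.List.pyGetD l indexB 0)) := by
    funext total indexB
    split_ifs <;> simp
  rw [hbody, PySem.List.foldl_add, sum_map_skip l iA h0 h1]

theorem ignore_index_spec : Claim_equal_ignore_index := by
  intro l _
  unfold Spec_ignore_index ignore_index ignore_index_alt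
  have houter : (PySem.List.pyRange 0 (l.length : Int) 1).foldl (fun total indexA =>
      (PySem.List.pyRange 0 (l.length : Int) 1).foldl (fun total indexB =>
        if indexA = indexB then total
        else total + PySem.List.pyGetD l indexB 0) total) 0
      = (PySem.List.pyRange 0 (l.length : Int) 1).foldl (fun total indexA =>
          total + (l.sum - PySem.List.pyGetD l indexA 0)) 0 := by
    apply PySem.List.foldl_congr_mem
    intro total indexA hA
    have hm := (PySem.List.mem_pyRange_one).1 hA
    exact inner_fold l indexA total hm.1 hm.2
  rw [houter, PySem.List.foldl_add]
  have hsum : ((PySem.List.pyRange 0 (l.length : Int) 1).map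
      (fun indexA => l.sum - PySem.List.pyGetD l indexA 0)).sum
      = (l.length : Int) * l.sum - l.sum := by
    have h1 : ((PySem.List.pyRange 0 (l.length : Int) 1).map
        (fun indexA => l.sum - PySem.List.pyGetD l indexA 0)).sum
        = ((PySem.List.pyRange 0 (l.length : Int) 1).map (fun _ => l.sum)).sum
          - ((PySem.List.pyRange 0 (l.length : Int) 1).map
              (fun indexA => PySem.List.pyGetD l indexA 0)).sum := by
      exact pv_sum_map_sub _ _ _
    rw [h1, PySem.List.map_pyGetD_pyRange_zero' l 0]
    rw [List.map_const', List.sum_replicate, PySem.List.length_pyRange_one]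
    simp
  rw [hsum]
  ring
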